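-- pv_equiv track=rewrite | github.com/aleczd/nono | script.py | acqCol
-- ===== SOURCE A (Python) =====
-- def acqCol(cmap,i):
--     if 1 not in cmap[i]:
--         return [0]
--     ccd = []
--     count = 0
--     track = False
--     for k in range(0,len(cmap[i])):
--         if track:
--             if cmap[i][k] == 1:
--                 count += 1
--             else:
--                 ccd.append(count)
--                 count = 0
--                 track = False
--         else:
--             if cmap[i][k] == 1:
--                 count += 1
--                 track = True
--     if track:
--         ccd.append(count)
--     return ccd
-- ===== SOURCE B (Python) =====
-- def acqCol(cmap, i):
--     row = cmap[i]
--     nbr = list(zip(row, row[1:]))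
--     starts = ([0] if row[:1] == [1] else []) + \
--         [k + 1 for k, (p, c) in enumerate(nbr) if c == 1 and p != 1]
--     ends = [k + 1 for k, (c, nx) in enumerate(nbr) if c == 1 and nx != 1] + \
--         ([len(row)] if row[-1:] == [1] else [])
--     lengths = [e - s for s, e in zip(starts, ends)]
--     return lengths if lengths else [0]
-- ===== Notes on version B (the rewrite author's own statement) =====
-- stated objective: alternative
-- what changed: Replaced A's run-length accumulator scan (track flag + running count, plus a membership pre-check) by boundary detection: B collects the positions where runs of 1s start and where they end from adjacent-pair comparisons and subtracts the two position lists elementwise.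
import Mathlib
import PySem

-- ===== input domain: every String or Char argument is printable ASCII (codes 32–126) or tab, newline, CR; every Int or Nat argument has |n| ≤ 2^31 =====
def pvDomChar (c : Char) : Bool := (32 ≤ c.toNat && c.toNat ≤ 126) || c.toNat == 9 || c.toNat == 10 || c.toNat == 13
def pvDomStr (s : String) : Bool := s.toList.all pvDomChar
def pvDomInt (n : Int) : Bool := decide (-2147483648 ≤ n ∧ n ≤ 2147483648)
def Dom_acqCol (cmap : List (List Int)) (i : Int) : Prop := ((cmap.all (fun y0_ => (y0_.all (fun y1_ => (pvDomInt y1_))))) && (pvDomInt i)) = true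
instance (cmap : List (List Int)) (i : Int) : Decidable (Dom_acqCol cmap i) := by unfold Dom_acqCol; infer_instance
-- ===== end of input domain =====

-- B replaces A's run-length counter/flag scan by boundary detection: it collects the
-- positions where runs of 1s start and where they end (from adjacent-pair comparisons)
-- and subtracts them positionwise (alternative algorithm; same O(n) cost).

-- ===== PORT A =====
-- step of A's for-loop: state (ccd, count, track)
def acqColStep (st : List Int × Int × Bool) (x : Int) : List Int × Int × Bool :=
  if st.2.2 then
    if x = 1 then (st.1, st.2.1 + 1, st.2.2) else (st.1 ++ [st.2.1], 0, false)
  else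
    if x = 1 then (st.1, st.2.1 + 1, true) else st

def acqCol (cmap : List (List Int)) (i : Int) : List Int :=
  let row := (PySem.List.pyGet? cmap i).getD []
  if ¬ (1 ∈ row) then [0]
  else
    let s := row.foldl acqColStep ([], 0, false)
    if s.2.2 then s.1 ++ [s.2.1] else s.1

-- ===== PORT B =====
def acqCol_alt (cmap : List (List Int)) (i : Int) : List Int :=
  let row := (PySem.List.pyGet? cmap i).getD []
  let nbr := row.zip (PySem.List.slice row (some 1) none)
  let starts := (if PySem.List.slice row none (some 1) = [1] then [(0 : Int)] else []) ++
    (PySem.List.enumerate nbr 0).filterMap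
      (fun kpc => if kpc.2.2 = 1 ∧ kpc.2.1 ≠ 1 then some (kpc.1 + 1) else none)
  let ends := (PySem.List.enumerate nbr 0).filterMap
      (fun kcn => if kcn.2.1 = 1 ∧ kcn.2.2 ≠ 1 then some (kcn.1 + 1) else none) ++
    (if PySem.List.slice row (some (-1)) none = [1] then [(row.length : Int)] else [])
  let lengths := (starts.zip ends).map (fun p => p.2 - p.1)
  if lengths.isEmpty then [0] else lengths

-- ===== PRECONDITION & SPEC =====
-- A raises IndexError when the (possibly negative) index i is out of range of cmap
def Pre_acqCol (cmap : List (List Int)) (i : Int) : Prop := PySem.Raise.InRange cmap.length i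
instance (cmap : List (List Int)) (i : Int) : Decidable (Pre_acqCol cmap i) := by unfold Pre_acqCol; infer_instance
def pvWitness_acqCol : List (List Int) × Int := ([[1, 0, 1, 1]], 0)

def Spec_acqCol (cmap : List (List Int)) (i : Int) (out : List Int) : Prop := out = acqCol_alt cmap i
instance (cmap : List (List Int)) (i : Int) (out : List Int) : Decidable (Spec_acqCol cmap i out) := by unfold Spec_acqCol; infer_instance

-- ===== CLAIM (what is proved, stated in full; the proofs are below) =====
def Claim_equal_acqCol : Prop := ∀ (cmap : List (List Int)) (i : Int), Dom_acqCol cmap i → Pre_acqCol cmap i → Spec_acqCol cmap i (acqCol cmap i)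

-- ===== LEMMAS AND PROOFS =====

-- the run-lengths of a row, by block decomposition (the common specification)
def pvF (row : List Int) : List Int :=
  match row with
  | [] => []
  | x :: xs =>
      if x = 1 then (((xs.takeWhile (· == 1)).length : Int) + 1) :: pvF (xs.dropWhile (· == 1))
      else pvF xs
termination_by row.length
decreasing_by
  · simp only [List.length_cons]
    exact Nat.lt_succ_of_le (List.length_dropWhile_le _ _)
  · simp

theorem pvF_nil : pvF [] = [] := by simp [pvF]

theorem pvF_cons_one (xs : List Int) :
    pvF (1 :: xs) = (((xs.takeWhile (· == 1)).length : Int) + 1) :: pvF (xs.dropWhile (· == 1)) := by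
  simp [pvF]

theorem pvF_skip (x : Int) (hx : x ≠ 1) (xs : List Int) :
    pvF (x :: xs) = pvF xs := by
  simp [pvF, hx]

theorem pvF_nil_iff (row : List Int) : pvF row = [] ↔ ¬ (1 ∈ row) := by
  induction row with
  | nil => simp [pvF_nil]
  | cons x xs ih =>
      by_cases hx : x = 1
      · subst hx
        simp [pvF_cons_one]
      · rw [pvF_skip x hx]
        simp [ih, Ne.symm hx]

-- ---- A-side: the state machine computes pvF ----

theorem step_false_one (ccd : List Int) (c : Int) :
    acqColStep (ccd, c, false) 1 = (ccd, c + 1, true) := by simp [acqColStep]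

theorem step_false_ne (ccd : List Int) (c : Int) (x : Int) (hx : x ≠ 1) :
    acqColStep (ccd, c, false) x = (ccd, c, false) := by simp [acqColStep, hx]

theorem step_true_one (ccd : List Int) (c : Int) :
    acqColStep (ccd, c, true) 1 = (ccd, c + 1, true) := by simp [acqColStep]

theorem step_true_ne (ccd : List Int) (c : Int) (x : Int) (hx : x ≠ 1) :
    acqColStep (ccd, c, true) x = (ccd ++ [c], 0, false) := by simp [acqColStep, hx]

-- flush of A's final state
def pvFin (s : List Int × Int × Bool) : List Int := if s.2.2 then s.1 ++ [s.2.1] else s.1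

-- the mutual loop invariant for A's state machine, by strong induction on the fuel n
theorem pv_machine (n : Nat) :
    (∀ row : List Int, row.length ≤ n → ∀ ccd : List Int,
        pvFin (row.foldl acqColStep (ccd, 0, false)) = ccd ++ pvF row) ∧
    (∀ row : List Int, row.length ≤ n → ∀ (ccd : List Int) (c : Int),
        pvFin (row.foldl acqColStep (ccd, c, true))
          = ccd ++ (c + ((row.takeWhile (· == 1)).length : Int)) :: pvF (row.dropWhile (· == 1))) := by
  induction n with
  | zero =>
      constructor
      · intro row hlen ccd
        have h : row = [] := List.eq_nil_of_length_eq_zero (Nat.le_zero.mp hlen)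
        subst h; simp [pvFin, pvF_nil]
      · intro row hlen ccd c
        have h : row = [] := List.eq_nil_of_length_eq_zero (Nat.le_zero.mp hlen)
        subst h; simp [pvFin, pvF_nil]
  | succ n ih =>
      obtain ⟨ihP, ihQ⟩ := ih
      constructor
      · intro row hlen ccd
        cases row with
        | nil => simp [pvFin, pvF_nil]
        | cons x xs =>
            have hxs : xs.length ≤ n := by simp at hlen; omega
            by_cases hx : x = 1
            · subst hx
              rw [List.foldl_cons, step_false_one, ihQ xs hxs ccd (0 + 1), pvF_cons_one]
              have harith : (0 : Int) + 1 + ((xs.takeWhile (· == 1)).length : Int)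
                  = ((xs.takeWhile (· == 1)).length : Int) + 1 := by ring
              rw [harith]
            · rw [List.foldl_cons, step_false_ne _ _ _ hx, ihP xs hxs ccd, pvF_skip x hx]
      · intro row hlen ccd c
        cases row with
        | nil => simp [pvFin, pvF_nil]
        | cons x xs =>
            have hxs : xs.length ≤ n := by simp at hlen; omega
            by_cases hx : x = 1
            · subst hx
              rw [List.foldl_cons, step_true_one, ihQ xs hxs ccd (c + 1)]
              simp only [List.takeWhile_cons, List.dropWhile_cons, beq_self_eq_true]
              have harith : c + 1 + ((xs.takeWhile (· == 1)).length : Int)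
                  = c + (((xs.takeWhile (· == 1)).length : Int) + 1) := by ring
              simp [harith]
            · have hbx : ¬ ((x == (1 : Int)) = true) := by simpa using hx
              rw [List.foldl_cons, step_true_ne _ _ _ hx, ihP xs hxs (ccd ++ [c])]
              simp only [List.takeWhile_cons, List.dropWhile_cons, if_neg hbx, List.length_nil]
              rw [pvF_skip x hx]
              simp

-- ---- B-side: boundary detection computes pvF ----

-- the comprehension over enumerate(nbr), start side
def pvSA (o : Int) : List (Int × Int) → List Int
  | [] => []
  | pc :: rest => (if pc.2 = 1 ∧ pc.1 ≠ 1 then [o + 1] else []) ++ pvSA (o + 1) rest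

-- the comprehension over enumerate(nbr), end side
def pvEA (o : Int) : List (Int × Int) → List Int
  | [] => []
  | cn :: rest => (if cn.1 = 1 ∧ cn.2 ≠ 1 then [o + 1] else []) ++ pvEA (o + 1) rest

-- run-start positions of row from offset o, p = previous element (0 at the top)
def pvStartsAux (o : Int) (p : Int) : List Int → List Int
  | [] => []
  | c :: rest => (if c = 1 ∧ p ≠ 1 then [o] else []) ++ pvStartsAux (o + 1) c rest

-- run-end positions of row from offset o
def pvEndsAux (o : Int) : List Int → List Int
  | [] => []
  | [c] => if c = 1 then [o + 1] else []
  | c :: d :: rest => (if c = 1 ∧ d ≠ 1 then [o + 1] else []) ++ pvEndsAux (o + 1) (d :: rest)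

theorem enum_pvSA (l : List (Int × Int)) : ∀ o : Int,
    (PySem.List.enumerate l o).filterMap
      (fun kpc => if kpc.2.2 = 1 ∧ kpc.2.1 ≠ 1 then some (kpc.1 + 1) else none) = pvSA o l := by
  induction l with
  | nil => intro o; simp [PySem.List.enumerate_nil, pvSA]
  | cons pc rest ih =>
      intro o
      rw [PySem.List.enumerate_cons]
      by_cases h : pc.2 = 1 ∧ pc.1 ≠ 1
      · simp [h, pvSA, ih]
      · simp [h, pvSA, ih]

theorem enum_pvEA (l : List (Int × Int)) : ∀ o : Int,
    (PySem.List.enumerate l o).filterMap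
      (fun kcn => if kcn.2.1 = 1 ∧ kcn.2.2 ≠ 1 then some (kcn.1 + 1) else none) = pvEA o l := by
  induction l with
  | nil => intro o; simp [PySem.List.enumerate_nil, pvEA]
  | cons cn rest ih =>
      intro o
      rw [PySem.List.enumerate_cons]
      by_cases h : cn.1 = 1 ∧ cn.2 ≠ 1
      · simp [h, pvEA, ih]
      · simp [h, pvEA, ih]

theorem pvSA_zip (l : List Int) : ∀ (o p : Int),
    pvSA o ((p :: l).zip l) = pvStartsAux (o + 1) p l := by
  induction l with
  | nil => intro o p; simp [pvSA, pvStartsAux]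
  | cons c r ih =>
      intro o p
      show pvSA o ((p, c) :: (c :: r).zip r) = _
      rw [pvSA, pvStartsAux, ih (o + 1) c]

theorem starts_top (row : List Int) :
    (if row.take 1 = [1] then [(0 : Int)] else []) ++ pvSA 0 (row.zip row.tail)
      = pvStartsAux 0 0 row := by
  cases row with
  | nil => simp [pvSA, pvStartsAux]
  | cons c rest =>
      show (if [c] = [1] then [(0 : Int)] else []) ++ pvSA 0 ((c :: rest).zip rest) = _
      rw [pvSA_zip rest 0 c, pvStartsAux]
      by_cases hc : c = 1
      · simp [hc]
      · simp [hc]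

theorem ends_top (row : List Int) : ∀ o : Int,
    pvEA o (row.zip row.tail) ++
      (if row.drop (row.length - 1) = [1] then [o + (row.length : Int)] else [])
      = pvEndsAux o row := by
  induction row with
  | nil => intro o; simp [pvEA, pvEndsAux]
  | cons c rest ih =>
      intro o
      cases rest with
      | nil =>
          show pvEA o [] ++ (if [c] = [1] then [o + ((1 : Nat) : Int)] else []) = _
          by_cases hc : c = 1
          · simp [pvEA, pvEndsAux, hc]
          · simp [pvEA, pvEndsAux, hc]
      | cons d r =>
          show pvEA o ((c, d) :: (d :: r).zip ((d :: r).tail)) ++ _ = _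
          rw [pvEA, pvEndsAux]
          have hlen : (c :: d :: r).length - 1 = ((d :: r).length - 1) + 1 := by
            simp
          have hdrop : (c :: d :: r).drop ((c :: d :: r).length - 1)
              = (d :: r).drop ((d :: r).length - 1) := by
            rw [hlen, List.drop_succ_cons]
          have hcast : o + ((c :: d :: r).length : Int) = (o + 1) + ((d :: r).length : Int) := by
            simp; ring
          rw [hdrop, hcast, List.append_assoc, ih (o + 1)]

-- after dropWhile (== 1) the head is not 1
theorem head_dropWhile_ne (l : List Int) :
    ∀ y ∈ (l.dropWhile (· == 1)).head?, y ≠ 1 := by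
  induction l with
  | nil => simp
  | cons x xs ih =>
      by_cases hx : x = 1
      · subst hx; simpa using ih
      · intro y hy
        simp [hx] at hy
        omega

theorem takeWhile_one_replicate (l : List Int) :
    l.takeWhile (· == 1) = List.replicate (l.takeWhile (· == 1)).length 1 := by
  induction l with
  | nil => simp
  | cons x xs ih =>
      by_cases hx : x = 1
      · subst hx
        simp [List.replicate_succ, ← ih]
      · simp [hx]

theorem pvStartsAux_replicate (t : Nat) : ∀ (o : Int) (rest : List Int),
    pvStartsAux o 1 (List.replicate t 1 ++ rest) = pvStartsAux (o + t) 1 rest := by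
  induction t with
  | zero => intro o rest; simp
  | succ t ih =>
      intro o rest
      rw [List.replicate_succ, List.cons_append, pvStartsAux]
      rw [ih (o + 1) rest]
      have harith : o + 1 + (t : Int) = o + ((t : Int) + 1) := by ring
      rw [harith]
      simp

theorem pvStartsAux_head_ne (rest : List Int)
    (hh : ∀ y ∈ rest.head?, y ≠ (1 : Int)) (o p q : Int) :
    pvStartsAux o p rest = pvStartsAux o q rest := by
  cases rest with
  | nil => rfl
  | cons y ys =>
      have hy : y ≠ 1 := hh y (by simp)
      rw [pvStartsAux, pvStartsAux]
      simp [hy]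

theorem pvEndsAux_replicate (t : Nat) : ∀ (o : Int) (rest : List Int),
    (∀ y ∈ rest.head?, y ≠ (1 : Int)) →
    pvEndsAux o (List.replicate (t + 1) 1 ++ rest) = (o + t + 1) :: pvEndsAux (o + t + 1) rest := by
  induction t with
  | zero =>
      intro o rest hh
      cases rest with
      | nil => simp [pvEndsAux]
      | cons y ys =>
          have hy : y ≠ 1 := hh y (by simp)
          show pvEndsAux o (1 :: y :: ys) = _
          rw [pvEndsAux]
          simp [hy]
  | succ t ih =>
      intro o rest hh
      have : List.replicate (t + 1 + 1) (1 : Int) ++ rest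
          = 1 :: (List.replicate (t + 1) 1 ++ rest) := by
        rw [List.replicate_succ, List.cons_append]
      rw [this]
      have hcons : List.replicate (t + 1) (1 : Int) ++ rest
          = 1 :: (List.replicate t 1 ++ rest) := by
        rw [List.replicate_succ, List.cons_append]
      rw [hcons, pvEndsAux, ← hcons, ih (o + 1) rest hh]
      have h1 : o + 1 + t + 1 = o + (t + 1 : Nat) + 1 := by push_cast; ring
      simp [h1]

-- the B-side invariant: positionwise differences of starts and ends give pvF
theorem pv_bounds (n : Nat) : ∀ row : List Int, row.length ≤ n → ∀ (o p : Int), p ≠ 1 →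
    ((pvStartsAux o p row).zip (pvEndsAux o row)).map (fun q => q.2 - q.1) = pvF row := by
  induction n with
  | zero =>
      intro row hlen o p _
      have h : row = [] := List.eq_nil_of_length_eq_zero (Nat.le_zero.mp hlen)
      subst h; simp [pvStartsAux, pvEndsAux, pvF_nil]
  | succ n ih =>
      intro row hlen o p hp
      cases row with
      | nil => simp [pvStartsAux, pvEndsAux, pvF_nil]
      | cons x xs =>
          have hxs : xs.length ≤ n := by simp at hlen; omega
          by_cases hx : x = 1
          · subst hx
            set t := (xs.takeWhile (· == 1)).length with ht
            set rest := xs.dropWhile (· == 1) with hrest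
            have hdecomp : xs = List.replicate t 1 ++ rest := by
              conv_lhs => rw [← List.takeWhile_append_dropWhile (p := (· == 1)) (l := xs)]
              rw [← takeWhile_one_replicate]
            have hh : ∀ y ∈ rest.head?, y ≠ (1 : Int) := head_dropWhile_ne xs
            have hstarts : pvStartsAux o p (1 :: xs) = o :: pvStartsAux (o + t + 1) 0 rest := by
              rw [pvStartsAux, hdecomp, pvStartsAux_replicate t (o + 1) rest,
                pvStartsAux_head_ne rest hh _ 1 0]
              have harith : o + 1 + (t : Int) = o + t + 1 := by ring
              rw [harith]
              simp [hp]
            have hends : pvEndsAux o (1 :: xs) = (o + t + 1) :: pvEndsAux (o + t + 1) rest := by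
              have : (1 : Int) :: xs = List.replicate (t + 1) 1 ++ rest := by
                rw [List.replicate_succ, List.cons_append, ← hdecomp]
              rw [this, pvEndsAux_replicate t o rest hh]
            have hrlen : rest.length ≤ n := by
              rw [hrest]
              have := List.length_dropWhile_le (· == (1 : Int)) xs
              omega
            rw [hstarts, hends, List.zip_cons_cons, List.map_cons,
              ih rest hrlen (o + t + 1) 0 (by norm_num), pvF_cons_one]
            congr 1
            · show o + (t : Int) + 1 - o = ((xs.takeWhile (· == 1)).length : Int) + 1
              rw [← ht]; ring
          · rw [pvF_skip x hx]
            have hstarts : pvStartsAux o p (x :: xs) = pvStartsAux (o + 1) x xs := by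
              rw [pvStartsAux]; simp [hx]
            have hends : pvEndsAux o (x :: xs) = pvEndsAux (o + 1) xs := by
              cases xs with
              | nil => simp [pvEndsAux, hx]
              | cons d r => rw [pvEndsAux]; simp [hx]
            rw [hstarts, hends, ih xs hxs (o + 1) x hx]

-- ===== VERDICT (by name: the statement is the Claim_ definition above) =====
theorem acqCol_spec : Claim_equal_acqCol := by
  intro cmap i _ _
  unfold Spec_acqCol acqCol acqCol_alt
  dsimp only
  set row := (PySem.List.pyGet? cmap i).getD [] with hrowdef
  have hslice2 : PySem.List.slice row none (some 1) = row.take 1 := by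
    have := PySem.List.slice_to_natCast row 1
    simpa using this
  have h0 : ((row.length : Int)) = (0 : Int) + (row.length : Int) := by ring
  rw [PySem.List.slice_from_one, hslice2, PySem.List.slice_from_neg_one,
    enum_pvSA, enum_pvEA, h0, starts_top, ends_top row 0,
    pv_bounds row.length row le_rfl 0 0 (by norm_num)]
  by_cases hmem : (1 : Int) ∈ row
  · have hm := (pv_machine row.length).1 row le_rfl []
    simp only [List.nil_append, pvFin] at hm
    have hne : pvF row ≠ [] := fun h => ((pvF_nil_iff row).mp h) hmem
    have hnotnot : ¬ (1 ∉ row) := fun h => h hmem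
    rw [if_neg hnotnot,
      show (if (pvF row).isEmpty = true then [0] else pvF row) = pvF row from
        if_neg (by simpa [List.isEmpty_iff] using hne)]
    exact hm
  · have hz : pvF row = [] := (pvF_nil_iff row).mpr hmem
    rw [if_pos hmem, if_pos (by simpa [List.isEmpty_iff] using hz)]
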